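-- pv_equiv track=rewrite | github.com/gh0stintheshe11/LeetCode-Solutions | solutions/2177.check-whether-two-strings-are-almost-equivalent/Python3.py | checkAlmostEquivalent
-- ===== SOURCE A (Python) =====
-- def checkAlmostEquivalent(word1: str, word2: str) -> bool:
--     from collections import Counter
--
--     freq1 = Counter(word1)
--     freq2 = Counter(word2)
--
--     for char in set(word1 + word2):
--         if abs(freq1.get(char, 0) - freq2.get(char, 0)) > 3:
--             return False
--
--     return True
-- ===== SOURCE B (Python) =====
-- def checkAlmostEquivalent(word1: str, word2: str) -> bool:
--     a = sorted(word1)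
--     b = sorted(word2)
--     i, j, n, m = 0, 0, len(a), len(b)
--     while i < n or j < m:
--         if j == m or (i < n and a[i] < b[j]):
--             c = a[i]
--         else:
--             c = b[j]
--         ci = i
--         while i < n and a[i] == c:
--             i += 1
--         cj = j
--         while j < m and b[j] == c:
--             j += 1
--         if abs((i - ci) - (j - cj)) > 3:
--             return False
--     return True
-- ===== Notes on version B (the rewrite author's own statement) =====
-- stated objective: alternative
-- what changed: B sorts both words and runs a two-pointer merge over the sorted character runs, comparing run lengths directly, with no Counter/dict/set at all; A builds two hash Counters and scans set(word1+word2) with paired .get lookups.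
import Mathlib
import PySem

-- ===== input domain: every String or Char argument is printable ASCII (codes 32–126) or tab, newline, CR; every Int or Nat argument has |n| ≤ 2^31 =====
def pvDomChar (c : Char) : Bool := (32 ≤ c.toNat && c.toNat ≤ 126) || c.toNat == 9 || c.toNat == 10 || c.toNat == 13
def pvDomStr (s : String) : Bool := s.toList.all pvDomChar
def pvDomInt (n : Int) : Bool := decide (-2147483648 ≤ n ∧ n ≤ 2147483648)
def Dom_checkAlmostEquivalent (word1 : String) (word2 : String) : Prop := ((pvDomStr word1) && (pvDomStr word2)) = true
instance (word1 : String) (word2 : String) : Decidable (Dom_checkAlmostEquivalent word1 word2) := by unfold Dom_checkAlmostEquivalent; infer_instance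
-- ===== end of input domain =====

-- B sorts both words and runs a two-pointer merge over the sorted character runs, comparing
-- run lengths directly (no Counter/dict/set), instead of A's two Counters + set(word1+word2)
-- scan: a genuinely different, sort-based algorithm of similar cost.


-- ===== PORT A =====
-- freq1/freq2 = Counter(word1)/Counter(word2); loop over set(word1+word2) with early
-- 'return False' — the Bool result is order-independent, ported as .all over the set.
def checkAlmostEquivalent (word1 : String) (word2 : String) : Bool :=
  let freq1 := PySem.Dict.counter word1.toList
  let freq2 := PySem.Dict.counter word2.toList
  (PySem.Set.ofList (word1.toList ++ word2.toList)).all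
    (fun char => !(decide (3 < |freq1.getD char 0 - freq2.getD char 0|)))

-- ===== PORT B =====
-- Source B's outer while loop over the two index pointers i, j, rendered as structural recursion
-- on the remaining suffixes of the sorted lists; the two inner run-scanning while loops
-- ('while i < n and a[i] == c: i += 1') are the dropWhile of the current run, and
-- (i - ci), (j - cj) are the length drops of the suffixes.
def mergeLoop : List Char → List Char → Bool
  | [], [] => true
  | a :: as, [] =>
      let as1 := (a :: as).dropWhile (· == a)
      if 3 < |(((a :: as).length - as1.length : Nat) : Int) - 0| then false
      else mergeLoop as1 []
  | [], b :: bs =>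
      let bs1 := (b :: bs).dropWhile (· == b)
      if 3 < |(0 : Int) - (((b :: bs).length - bs1.length : Nat) : Int)| then false
      else mergeLoop [] bs1
  | a :: as, b :: bs =>
      let c := if a < b then a else b
      let as1 := (a :: as).dropWhile (· == c)
      let bs1 := (b :: bs).dropWhile (· == c)
      if 3 < |(((a :: as).length - as1.length : Nat) : Int) - (((b :: bs).length - bs1.length : Nat) : Int)| then false
      else mergeLoop as1 bs1
termination_by as bs => as.length + bs.length
decreasing_by
  · simpa using Nat.lt_succ_of_le ((List.dropWhile_sublist _).length_le)
  · simpa using Nat.lt_succ_of_le ((List.dropWhile_sublist _).length_le)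
  · simp only [List.length_cons]
    by_cases hab : a < b
    · have hce : (if _h : a < b then a else b) = a := dif_pos hab
      rw [hce]
      have h1 : ((a :: as).dropWhile (· == a)).length ≤ as.length := by
        simp only [List.dropWhile_cons, beq_self_eq_true, if_pos]
        exact (List.dropWhile_sublist _).length_le
      have h2 : ((b :: bs).dropWhile (· == a)).length ≤ bs.length + 1 := by
        simpa using (List.dropWhile_sublist (l := b :: bs) (p := (· == a))).length_le
      omega
    · have hce : (if _h : a < b then a else b) = b := dif_neg hab
      rw [hce]
      have h1 : ((b :: bs).dropWhile (· == b)).length ≤ bs.length := by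
        simp only [List.dropWhile_cons, beq_self_eq_true, if_pos]
        exact (List.dropWhile_sublist _).length_le
      have h2 : ((a :: as).dropWhile (· == b)).length ≤ as.length + 1 := by
        simpa using (List.dropWhile_sublist (l := a :: as) (p := (· == b))).length_le
      omega

def checkAlmostEquivalent_alt (word1 : String) (word2 : String) : Bool :=
  let a := PySem.List.sorted word1.toList (fun x => x) false
  let b := PySem.List.sorted word2.toList (fun x => x) false
  mergeLoop a b

-- ===== PRECONDITION & SPEC =====
def Spec_checkAlmostEquivalent (word1 : String) (word2 : String) (out : Bool) : Prop := out = checkAlmostEquivalent_alt word1 word2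
instance (word1 : String) (word2 : String) (out : Bool) : Decidable (Spec_checkAlmostEquivalent word1 word2 out) := by unfold Spec_checkAlmostEquivalent; infer_instance

-- ===== CLAIM (what is proved, stated in full; the proofs are below) =====
def Claim_equal_checkAlmostEquivalent : Prop := ∀ (word1 : String) (word2 : String), Dom_checkAlmostEquivalent word1 word2 → Spec_checkAlmostEquivalent word1 word2 (checkAlmostEquivalent word1 word2)

-- ===== LEMMAS AND PROOFS =====

-- A-side characterisation: A = true iff every character's count difference is ≤ 3.
theorem portA_iff (w1 w2 : List Char) :
    (PySem.Set.ofList (w1 ++ w2)).all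
      (fun char => !(decide (3 < |(PySem.Dict.counter w1).getD char 0 - (PySem.Dict.counter w2).getD char 0|))) = true
    ↔ ∀ c : Char, |(w1.count c : Int) - (w2.count c : Int)| ≤ 3 := by
  simp only [List.all_eq_true, PySem.Set.mem_ofList, PySem.Dict.getD_counter,
    Bool.not_eq_eq_eq_not, Bool.not_true, decide_eq_false_iff_not, not_lt]
  constructor
  · intro h c
    by_cases hc : c ∈ w1 ++ w2
    · exact h c hc
    · simp only [List.mem_append, not_or] at hc
      rw [List.count_eq_zero.mpr hc.1, List.count_eq_zero.mpr hc.2]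
      simp
  · intro h c _; exact h c

-- a is not in the dropWhile (· == a) part of a sorted list whose elements are all ≥ a
theorem not_mem_dropWhile (a : Char) (l : List Char)
    (hp : l.Pairwise (· ≤ ·)) (hall : ∀ e ∈ l, a ≤ e) : a ∉ l.dropWhile (· == a) := by
  induction l with
  | nil => simp
  | cons b t ih =>
    rcases List.pairwise_cons.mp hp with ⟨hb, ht⟩
    by_cases hba : b = a
    · subst hba
      simp only [List.dropWhile_cons, beq_self_eq_true, if_pos]
      exact ih ht (fun e he => hb e he)
    · have : (b == a) = false := by simp [hba]
      simp only [List.dropWhile_cons, this, if_neg, Bool.false_eq_true, not_false_iff]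
      intro hmem
      rcases List.mem_cons.mp hmem with h | h
      · exact hba h.symm
      · have h1 : a ≤ b := hall b (List.mem_cons_self ..)
        have h2 : b ≤ a := hb a h
        exact hba (le_antisymm h2 h1)

-- run-split facts for a sorted list l all of whose elements are ≥ c
theorem drop_run (c : Char) (l : List Char)
    (hp : l.Pairwise (· ≤ ·)) (hall : ∀ e ∈ l, c ≤ e) :
    (l.dropWhile (· == c)).count c = 0 ∧
    (∀ c', c' ≠ c → (l.dropWhile (· == c)).count c' = l.count c') ∧
    l.count c + (l.dropWhile (· == c)).length = l.length := by
  have hsplit : l.takeWhile (· == c) ++ l.dropWhile (· == c) = l :=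
    List.takeWhile_append_dropWhile
  have htake : ∀ e ∈ l.takeWhile (· == c), e = c := by
    intro e he
    have := List.mem_takeWhile_imp he
    simpa using this
  have hd0 : (l.dropWhile (· == c)).count c = 0 :=
    List.count_eq_zero.mpr (not_mem_dropWhile c l hp hall)
  refine ⟨hd0, ?_, ?_⟩
  · intro c' hne
    have h2 : (l.takeWhile (· == c)).count c' = 0 :=
      List.count_eq_zero.mpr (fun hm => hne (htake c' hm))
    conv_rhs => rw [← hsplit]
    rw [List.count_append, h2]
    omega
  · have h1 : (l.takeWhile (· == c)).count c = (l.takeWhile (· == c)).length := by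
      rw [List.count_eq_length]
      intro e he; simp [htake e he]
    have h2 : l.count c = (l.takeWhile (· == c)).count c + (l.dropWhile (· == c)).count c := by
      conv_lhs => rw [← hsplit]
      rw [List.count_append]
    have h3 : l.length = (l.takeWhile (· == c)).length + (l.dropWhile (· == c)).length := by
      conv_lhs => rw [← hsplit]
      rw [List.length_append]
    omega

-- B-side characterisation: on sorted inputs, mergeLoop = true iff every count difference is ≤ 3.
theorem mergeLoop_iff : ∀ (n : ℕ) (as bs : List Char), as.length + bs.length ≤ n →
    as.Pairwise (· ≤ ·) → bs.Pairwise (· ≤ ·) →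
    (mergeLoop as bs = true ↔ ∀ c : Char, |(as.count c : Int) - (bs.count c : Int)| ≤ 3) := by
  intro n
  induction n with
  | zero =>
    intro as bs hlen _ _
    have ha : as = [] := List.length_eq_zero_iff.mp (by omega)
    have hb : bs = [] := List.length_eq_zero_iff.mp (by omega)
    subst ha; subst hb
    simp [mergeLoop]
  | succ n ih =>
    intro as bs hlen hpa hpb
    match as, bs with
    | [], [] => simp [mergeLoop]
    | a :: as, [] =>
      have hall : ∀ e ∈ a :: as, a ≤ e := by
        intro e he; rcases List.mem_cons.mp he with h | h
        · exact le_of_eq h.symm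
        · exact (List.pairwise_cons.mp hpa).1 e h
      obtain ⟨h0, hoth, hlen'⟩ := drop_run a (a :: as) hpa hall
      have hpd : ((a :: as).dropWhile (· == a)).Pairwise (· ≤ ·) :=
        hpa.sublist (List.dropWhile_sublist _)
      have hdlen : ((a :: as).dropWhile (· == a)).length ≤ as.length := by
        simp only [List.dropWhile_cons, beq_self_eq_true, if_pos]
        exact (List.dropWhile_sublist _).length_le
      rw [mergeLoop]
      simp only [List.length_cons, List.count_nil]
      split
      · rename_i hgt
        rw [lt_abs] at hgt
        constructor
        · intro h; exact absurd h (by simp)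
        · intro h
          have hc := h a
          rw [abs_le] at hc
          simp only [List.length_cons] at hlen'
          exfalso; omega
      · rename_i hle
        rw [not_lt, abs_le] at hle
        rw [ih _ [] (by simp only [List.length_nil]; simp only [List.length_cons] at hlen; omega) hpd (by simp)]
        simp only [List.count_nil]
        constructor
        · intro h c
          by_cases hc : c = a
          · subst hc
            simp only [List.length_cons] at hlen'
            rw [abs_le]; omega
          · have := h c
            rw [hoth c hc] at this
            exact this
        · intro h c
          by_cases hc : c = a
          · subst hc; rw [h0]; simp
          · rw [hoth c hc]
            exact h c
    | [], b :: bs =>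
      have hall : ∀ e ∈ b :: bs, b ≤ e := by
        intro e he; rcases List.mem_cons.mp he with h | h
        · exact le_of_eq h.symm
        · exact (List.pairwise_cons.mp hpb).1 e h
      obtain ⟨h0, hoth, hlen'⟩ := drop_run b (b :: bs) hpb hall
      have hpd : ((b :: bs).dropWhile (· == b)).Pairwise (· ≤ ·) :=
        hpb.sublist (List.dropWhile_sublist _)
      have hdlen : ((b :: bs).dropWhile (· == b)).length ≤ bs.length := by
        simp only [List.dropWhile_cons, beq_self_eq_true, if_pos]
        exact (List.dropWhile_sublist _).length_le
      rw [mergeLoop]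
      simp only [List.length_cons, List.count_nil]
      split
      · rename_i hgt
        rw [lt_abs] at hgt
        constructor
        · intro h; exact absurd h (by simp)
        · intro h
          have hc := h b
          rw [abs_le] at hc
          simp only [List.length_cons] at hlen'
          exfalso; omega
      · rename_i hle
        rw [not_lt, abs_le] at hle
        rw [ih [] _ (by simp only [List.length_nil]; simp only [List.length_cons] at hlen; omega) (by simp) hpd]
        simp only [List.count_nil]
        constructor
        · intro h c
          by_cases hc : c = b
          · subst hc
            simp only [List.length_cons] at hlen'
            rw [abs_le]; omega
          · have := h c
            rw [hoth c hc] at this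
            exact this
        · intro h c
          by_cases hc : c = b
          · subst hc; rw [h0]; simp
          · rw [hoth c hc]
            exact h c
    | a :: as, b :: bs =>
      rcases List.pairwise_cons.mp hpa with ⟨hba, -⟩
      rcases List.pairwise_cons.mp hpb with ⟨hbb, -⟩
      set c := if a < b then a else b with hc
      have hca : c ≤ a := by
        rw [hc]; split
        · exact le_refl a
        · exact le_of_not_gt (by assumption)
      have hcb : c ≤ b := by
        rw [hc]; split
        · exact le_of_lt (by assumption)
        · exact le_refl b
      have halla : ∀ e ∈ a :: as, c ≤ e := by
        intro e he; rcases List.mem_cons.mp he with h | h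
        · exact h ▸ hca
        · exact le_trans hca (hba e h)
      have hallb : ∀ e ∈ b :: bs, c ≤ e := by
        intro e he; rcases List.mem_cons.mp he with h | h
        · exact h ▸ hcb
        · exact le_trans hcb (hbb e h)
      obtain ⟨ha0, haoth, halen⟩ := drop_run c (a :: as) hpa halla
      obtain ⟨hb0, hboth, hblen⟩ := drop_run c (b :: bs) hpb hallb
      have hpda : ((a :: as).dropWhile (· == c)).Pairwise (· ≤ ·) :=
        hpa.sublist (List.dropWhile_sublist _)
      have hpdb : ((b :: bs).dropWhile (· == c)).Pairwise (· ≤ ·) :=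
        hpb.sublist (List.dropWhile_sublist _)
      -- the run of c is dropped from at least one of the two lists, so the total length shrinks
      have hshrink : ((a :: as).dropWhile (· == c)).length + ((b :: bs).dropWhile (· == c)).length
          ≤ as.length + bs.length + 1 := by
        have h1 : ((a :: as).dropWhile (· == c)).length ≤ as.length + 1 := by
          simpa using (List.dropWhile_sublist (l := a :: as) (p := (· == c))).length_le
        have h2 : ((b :: bs).dropWhile (· == c)).length ≤ bs.length + 1 := by
          simpa using (List.dropWhile_sublist (l := b :: bs) (p := (· == c))).length_le
        by_cases hab : a < b
        · have hceq : c = a := by rw [hc, if_pos hab]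
          have : ((a :: as).dropWhile (· == c)).length ≤ as.length := by
            rw [hceq]
            simp only [List.dropWhile_cons, beq_self_eq_true, if_pos]
            exact (List.dropWhile_sublist _).length_le
          omega
        · have hceq : c = b := by rw [hc, if_neg hab]
          have : ((b :: bs).dropWhile (· == c)).length ≤ bs.length := by
            rw [hceq]
            simp only [List.dropWhile_cons, beq_self_eq_true, if_pos]
            exact (List.dropWhile_sublist _).length_le
          omega
      rw [mergeLoop]
      simp only [List.length_cons, ← hc]
      split
      · rename_i hgt
        rw [lt_abs] at hgt
        constructor
        · intro h; exact absurd h (by simp)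
        · intro h
          have hcx := h c
          rw [abs_le] at hcx
          simp only [List.length_cons] at halen hblen
          exfalso; omega
      · rename_i hle
        rw [not_lt, abs_le] at hle
        rw [ih _ _ (by simp only [List.length_cons] at hlen; omega) hpda hpdb]
        constructor
        · intro h c'
          by_cases hcc : c' = c
          · subst hcc
            simp only [List.length_cons] at halen hblen
            rw [abs_le]; omega
          · have := h c'
            rw [haoth c' hcc, hboth c' hcc] at this
            exact this
        · intro h c'
          by_cases hcc : c' = c
          · subst hcc; rw [ha0, hb0]; simp
          · rw [haoth c' hcc, hboth c' hcc]
            exact h c'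

-- ===== VERDICT (by name: the statement is the Claim_ definition above) =====
theorem checkAlmostEquivalent_spec : Claim_equal_checkAlmostEquivalent := by
  intro word1 word2 _
  unfold Spec_checkAlmostEquivalent checkAlmostEquivalent checkAlmostEquivalent_alt
  dsimp only
  rw [Bool.eq_iff_iff, portA_iff]
  rw [mergeLoop_iff (word1.toList.length + word2.toList.length) _ _
      (by rw [PySem.List.length_sorted, PySem.List.length_sorted])
      (PySem.List.sorted_pairwise _ _) (PySem.List.sorted_pairwise _ _)]
  constructor <;> intro h c <;> have := h c <;>
    simpa [List.count_eq_countP,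
      List.Perm.countP_eq _ (PySem.List.sorted_perm word1.toList (fun x => x) false),
      List.Perm.countP_eq _ (PySem.List.sorted_perm word2.toList (fun x => x) false)]
      using this
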